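-- pv_equiv track=rewrite | github.com/jomoormann/vetscan | src/i18n.py | get_language_from_request
-- ===== SOURCE A (Python) =====
-- from typing import Dict, Optional
--
-- SUPPORTED_LANGUAGES = ['en', 'pt']
--
-- DEFAULT_LANGUAGE = 'pt'
--
-- def get_language_from_request(
--     query_param: Optional[str] = None,
--     cookie_value: Optional[str] = None,
--     accept_language: Optional[str] = None
-- ) -> str:
--     """
--     Determine the language from request parameters.
--     Priority: Query param > Cookie > Accept-Language header > Default
--
--     Args:
--         query_param: ?lang=xx query parameter value
--         cookie_value: Language cookie value
--         accept_language: Accept-Language header value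
--
--     Returns:
--         Language code ('en' or 'pt')
--     """
--     # 1. Query parameter has highest priority
--     if query_param and query_param in SUPPORTED_LANGUAGES:
--         return query_param
--
--     # 2. Cookie value
--     if cookie_value and cookie_value in SUPPORTED_LANGUAGES:
--         return cookie_value
--
--     # 3. Accept-Language header
--     if accept_language:
--         # Parse Accept-Language header (simplified)
--         # Format: "en-US,en;q=0.9,pt;q=0.8"
--         for part in accept_language.split(','):
--             lang_part = part.split(';')[0].strip().lower()
--             # Check for exact match or language prefix
--             if lang_part in SUPPORTED_LANGUAGES:
--                 return lang_part
--             # Check language prefix (e.g., "en-US" -> "en")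
--             lang_prefix = lang_part.split('-')[0]
--             if lang_prefix in SUPPORTED_LANGUAGES:
--                 return lang_prefix
--
--     # 4. Default language
--     return DEFAULT_LANGUAGE
-- ===== SOURCE B (Python) =====
-- SUPPORTED_LANGUAGES = ['en', 'pt']
--
-- DEFAULT_LANGUAGE = 'pt'
--
-- def get_language_from_request(query_param=None, cookie_value=None, accept_language=None):
--     """Resolve language by folding the candidates back-to-front: start from the
--     default and overwrite the answer with each supported candidate seen, visiting
--     candidates in reverse priority order (header prefix, header part, cookie, query),
--     so the highest-priority supported one wins last."""
--     best = DEFAULT_LANGUAGE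
--     if accept_language is not None:
--         for part in reversed(accept_language.split(',')):
--             lang = part.split(';')[0].strip().lower()
--             prefix = lang.split('-')[0]
--             if prefix in SUPPORTED_LANGUAGES:
--                 best = prefix
--             if lang in SUPPORTED_LANGUAGES:
--                 best = lang
--     if cookie_value in SUPPORTED_LANGUAGES:
--         best = cookie_value
--     if query_param in SUPPORTED_LANGUAGES:
--         best = query_param
--     return best
-- ===== Notes on version B (the rewrite author's own statement) =====
-- stated objective: alternative
-- what changed: Replaces A's forward early-return search with a reverse fold: B starts from the default and traverses the candidates in reverse priority order (each header part's prefix then the part itself, then cookie, then query), overwriting an accumulator on every supported candidate so the highest-priority supported one wins last; A's truthiness guards on query/cookie disappear because falsy values are never supported languages.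
import Mathlib
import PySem

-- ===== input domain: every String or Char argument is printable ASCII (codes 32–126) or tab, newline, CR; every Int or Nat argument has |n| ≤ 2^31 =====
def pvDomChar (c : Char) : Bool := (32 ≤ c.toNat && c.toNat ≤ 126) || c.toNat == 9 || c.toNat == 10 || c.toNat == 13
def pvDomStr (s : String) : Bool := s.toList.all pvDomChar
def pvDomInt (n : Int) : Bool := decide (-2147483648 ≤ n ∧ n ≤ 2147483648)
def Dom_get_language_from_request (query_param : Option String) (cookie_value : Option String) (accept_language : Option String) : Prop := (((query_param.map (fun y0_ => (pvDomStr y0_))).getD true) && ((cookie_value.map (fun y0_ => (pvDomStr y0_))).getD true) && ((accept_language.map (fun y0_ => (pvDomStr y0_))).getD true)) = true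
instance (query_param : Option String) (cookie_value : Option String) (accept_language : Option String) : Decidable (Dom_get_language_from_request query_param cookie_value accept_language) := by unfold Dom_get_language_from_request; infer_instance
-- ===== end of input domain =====

-- B replaces A's forward early-return search by a reverse fold that starts from the
-- default and overwrites an accumulator on each supported candidate (objective: alternative).

def SUPPORTED_LANGUAGES : List String := ["en", "pt"]

def DEFAULT_LANGUAGE : String := "pt"

-- s.split(sep) for a nonempty literal sep (split? is total there)
def pySplit (s sep : String) : List String := (PySem.Str.split? s sep).getD []

-- ===== PORT A =====
-- the 'for part in accept_language.split(',')' loop with its two guarded returns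
def pvHeaderLoopA : List String → String
  | [] => DEFAULT_LANGUAGE
  | part :: rest =>
    let lang_part := PySem.Str.lower (PySem.Str.strip ((pySplit part ";").headD ""))
    if SUPPORTED_LANGUAGES.contains lang_part then lang_part
    else
      let lang_prefix := (pySplit lang_part "-").headD ""
      if SUPPORTED_LANGUAGES.contains lang_prefix then lang_prefix
      else pvHeaderLoopA rest

def get_language_from_request (query_param : Option String) (cookie_value : Option String) (accept_language : Option String) : String :=
  -- 'x and x in SUPPORTED_LANGUAGES': None/"" are falsy, hence the getD "" ≠ "" guard
  if (query_param.getD "") ≠ "" ∧ SUPPORTED_LANGUAGES.contains (query_param.getD "") then query_param.getD ""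
  else if (cookie_value.getD "") ≠ "" ∧ SUPPORTED_LANGUAGES.contains (cookie_value.getD "") then cookie_value.getD ""
  else if (accept_language.getD "") ≠ "" then pvHeaderLoopA (pySplit (accept_language.getD "") ",")
  else DEFAULT_LANGUAGE

-- ===== PORT B =====
-- Source B's loop body: fold step over one header part (reverse order), overwriting best
def pvStepB (best : String) (part : String) : String :=
  let lang := PySem.Str.lower (PySem.Str.strip ((pySplit part ";").headD ""))
  let pref := (pySplit lang "-").headD ""
  let best := if SUPPORTED_LANGUAGES.contains pref then pref else best
  if SUPPORTED_LANGUAGES.contains lang then lang else best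

def get_language_from_request_alt (query_param : Option String) (cookie_value : Option String) (accept_language : Option String) : String :=
  let best := DEFAULT_LANGUAGE
  let best := match accept_language with
    | some s => ((pySplit s ",").reverse).foldl pvStepB best
    | none => best
  -- 'cookie_value in SUPPORTED_LANGUAGES': None is never a member
  let best := match cookie_value with
    | some cv => if SUPPORTED_LANGUAGES.contains cv then cv else best
    | none => best
  match query_param with
    | some q => if SUPPORTED_LANGUAGES.contains q then q else best
    | none => best

-- ===== PRECONDITION & SPEC =====
def Spec_get_language_from_request (query_param : Option String) (cookie_value : Option String) (accept_language : Option String) (out : String) : Prop := out = get_language_from_request_alt query_param cookie_value accept_language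
instance (query_param : Option String) (cookie_value : Option String) (accept_language : Option String) (out : String) : Decidable (Spec_get_language_from_request query_param cookie_value accept_language out) := by unfold Spec_get_language_from_request; infer_instance

-- ===== CLAIM (what is proved, stated in full; the proofs are below) =====
def Claim_equal_get_language_from_request : Prop := ∀ (query_param : Option String) (cookie_value : Option String) (accept_language : Option String), Dom_get_language_from_request query_param cookie_value accept_language → Spec_get_language_from_request query_param cookie_value accept_language (get_language_from_request query_param cookie_value accept_language)

-- ===== LEMMAS AND PROOFS =====

-- A's forward first-match header loop equals B's reverse fold
theorem headerLoop_eq (ps : List String) :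
    pvHeaderLoopA ps = (ps.reverse).foldl pvStepB DEFAULT_LANGUAGE := by
  induction ps with
  | nil => rfl
  | cons part rest ih =>
    rw [List.reverse_cons, List.foldl_append, ← ih]
    simp only [pvHeaderLoopA, pvStepB, List.foldl_cons, List.foldl_nil]

theorem contains_supported_ne_empty {c : String} (h : c ∈ SUPPORTED_LANGUAGES) : c ≠ "" := by
  intro he; subst he; exact absurd h (by decide)

-- the accept_language stage alone agrees between the two programs
theorem header_stage_eq (accept_language : Option String) :
    (if (accept_language.getD "") ≠ "" then pvHeaderLoopA (pySplit (accept_language.getD "") ",")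
     else DEFAULT_LANGUAGE) =
    (match accept_language with
     | some s => ((pySplit s ",").reverse).foldl pvStepB DEFAULT_LANGUAGE
     | none => DEFAULT_LANGUAGE) := by
  cases accept_language with
  | none => rfl
  | some s =>
    by_cases hs : s = ""
    · subst hs; decide
    · simpa [Option.getD, hs] using headerLoop_eq (pySplit s ",")

theorem get_language_from_request_eq (query_param cookie_value accept_language : Option String) :
    get_language_from_request query_param cookie_value accept_language =
      get_language_from_request_alt query_param cookie_value accept_language := by
  unfold get_language_from_request get_language_from_request_alt
  have hal := header_stage_eq accept_language
  cases query_param with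
  | none =>
    cases cookie_value with
    | none => simpa using hal
    | some c =>
      by_cases hc : c ∈ SUPPORTED_LANGUAGES
      · simp [hc, contains_supported_ne_empty hc]
      · simpa [hc] using hal
  | some q =>
    by_cases hq : q ∈ SUPPORTED_LANGUAGES
    · simp [hq, contains_supported_ne_empty hq]
    · cases cookie_value with
      | none => simpa [hq] using hal
      | some c =>
        by_cases hc : c ∈ SUPPORTED_LANGUAGES
        · simp [hq, hc, contains_supported_ne_empty hc]
        · simpa [hq, hc] using hal

-- ===== VERDICT (by name: the statement is the Claim_ definition above) =====
theorem get_language_from_request_spec : Claim_equal_get_language_from_request := by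
  intro query_param cookie_value accept_language _
  exact get_language_from_request_eq query_param cookie_value accept_language
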